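-- pv_equiv track=rewrite | github.com/paltdariusz/asystent-planu | modules/timetables_generator.py | dividing_data
-- ===== SOURCE A (Python) =====
-- def dividing_data(results):
--     PLANS = []
--     timetables = []
--     for res in results:
--         if res is None:
--             continue
--         else:
--             timetables.append(res[0])
--             PLANS.append(res[1])
--     return timetables, PLANS
-- ===== SOURCE B (Python) =====
-- def dividing_data(results):
--     # divide and conquer: split the index range in half, recurse, concatenate
--     def go(lo, hi):
--         n = hi - lo
--         if n == 0:
--             return [], []
--         if n == 1:
--             res = results[lo]
--             if res is None:
--                 return [], []
--             return [res[0]], [res[1]]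
--         mid = (lo + hi) // 2
--         lt, lp = go(lo, mid)
--         rt, rp = go(mid, hi)
--         return lt + rt, lp + rp
--     return go(0, len(results))
-- ===== Notes on version B (the rewrite author's own statement) =====
-- stated objective: alternative
-- what changed: Replaced A's single left-to-right loop appending into two accumulator lists by a divide-and-conquer recursion that splits the index range in half, recurses on both halves and concatenates the halves' results.
import Mathlib
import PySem

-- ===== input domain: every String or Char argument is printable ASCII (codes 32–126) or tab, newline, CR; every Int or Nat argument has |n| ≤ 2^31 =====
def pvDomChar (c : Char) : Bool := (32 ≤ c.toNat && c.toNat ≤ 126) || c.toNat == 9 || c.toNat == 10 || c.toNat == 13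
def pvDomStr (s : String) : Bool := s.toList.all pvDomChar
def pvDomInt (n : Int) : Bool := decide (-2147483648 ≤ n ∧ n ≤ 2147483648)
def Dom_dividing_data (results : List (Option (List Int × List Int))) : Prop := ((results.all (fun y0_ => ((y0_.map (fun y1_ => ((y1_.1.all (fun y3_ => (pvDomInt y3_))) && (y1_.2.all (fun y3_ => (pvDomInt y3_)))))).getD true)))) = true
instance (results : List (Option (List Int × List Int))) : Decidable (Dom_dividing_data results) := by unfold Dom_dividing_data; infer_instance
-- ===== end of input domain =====

-- B replaces A's single accumulating loop by a divide-and-conquer split-recurse-concatenate (alternative; same result, not claimed faster).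


-- ===== PORT A =====
-- loop over results, appending res[0] to timetables and res[1] to PLANS
def dividing_data (results : List (Option (List Int × List Int))) : List (List Int) × List (List Int) :=
  let st := results.foldl
    (fun (acc : List (List Int) × List (List Int)) res =>
      match res with
      | none => acc
      | some r => (acc.1 ++ [r.1], acc.2 ++ [r.2]))
    ([], [])
  (st.1, st.2)

-- ===== PORT B =====
-- divide and conquer: go splits its range in half, recurses on both halves, concatenates.
-- Python's go(lo, hi) works on index range lo..hi of results; here that sub-range is the sublist
-- itself, and Python's mid = (lo+hi)//2 is lo + length/2, i.e. splitting at length/2.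
def dd_go : List (Option (List Int × List Int)) → List (List Int) × List (List Int)
  | [] => ([], [])
  | [res] =>
    match res with
    | none => ([], [])
    | some r => ([r.1], [r.2])
  | h1 :: h2 :: tl =>
    let mid := (h1 :: h2 :: tl).length / 2
    let left := dd_go ((h1 :: h2 :: tl).take mid)
    let right := dd_go ((h1 :: h2 :: tl).drop mid)
    (left.1 ++ right.1, left.2 ++ right.2)
termination_by l => l.length
decreasing_by
  · simp only [List.length_take, List.length_cons]; omega
  · simp only [List.length_drop, List.length_cons]; omega

def dividing_data_alt (results : List (Option (List Int × List Int))) : List (List Int) × List (List Int) :=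
  dd_go results

-- ===== PRECONDITION & SPEC =====
def Spec_dividing_data (results : List (Option (List Int × List Int))) (out : List (List Int) × List (List Int)) : Prop := out = dividing_data_alt results
instance (results : List (Option (List Int × List Int))) (out : List (List Int) × List (List Int)) : Decidable (Spec_dividing_data results out) := by unfold Spec_dividing_data; infer_instance

-- ===== CLAIM =====
def Claim_equal_dividing_data : Prop := ∀ (results : List (Option (List Int × List Int))), Dom_dividing_data results → Spec_dividing_data results (dividing_data results)

-- ===== LEMMAS AND PROOFS =====

-- closed form for B: dd_go yields the two projections of the filtered pair list
theorem dd_go_eq (l : List (Option (List Int × List Int))) :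
    dd_go l = ((l.filterMap (fun res => res.map (fun r => (r.1, r.2)))).map Prod.fst,
               (l.filterMap (fun res => res.map (fun r => (r.1, r.2)))).map Prod.snd) := by
  induction l using dd_go.induct with
  | case1 => simp [dd_go]
  | case2 => simp [dd_go]
  | case3 => simp [dd_go]
  | case4 a b tl mid ih1 ih2 =>
    rw [dd_go]
    rw [show ((a :: b :: tl).length / 2) = mid from rfl] at *
    rw [ih1, ih2]
    simp only [← List.map_append, ← List.filterMap_append, List.take_append_drop]

-- loop invariant: A's fold appends the unzipped filtered pairs after the accumulators
theorem dividing_data_fold (results : List (Option (List Int × List Int)))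
    (acc : List (List Int) × List (List Int)) :
    results.foldl
      (fun (acc : List (List Int) × List (List Int)) res =>
        match res with
        | none => acc
        | some r => (acc.1 ++ [r.1], acc.2 ++ [r.2]))
      acc
    = (acc.1 ++ (results.filterMap (fun res => res.map (fun r => (r.1, r.2)))).map Prod.fst,
       acc.2 ++ (results.filterMap (fun res => res.map (fun r => (r.1, r.2)))).map Prod.snd) := by
  induction results generalizing acc with
  | nil => simp
  | cons hd tl ih =>
    cases hd with
    | none => simp [List.foldl, ih acc]
    | some r => simp [List.foldl, ih (acc.1 ++ [r.1], acc.2 ++ [r.2])]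

-- ===== VERDICT =====
theorem dividing_data_spec : Claim_equal_dividing_data := by
  intro results _
  unfold Spec_dividing_data dividing_data dividing_data_alt
  rw [dividing_data_fold, dd_go_eq]
  simp
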